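-- pv_equiv track=rewrite | github.com/event-reminder/DesktopApp | app/ui/widgets/ui_models/retrieve_events.py | get_tool_tip
-- ===== SOURCE A (Python) =====
-- def get_tool_tip(description):
-- 	split_str = description.split()
-- 	result = 'Description:\n\n'
-- 	for i in range(len(split_str)):
-- 		if i % 10 == 0 and i != 0:
-- 			result += '\n'
-- 		result += split_str[i] + ' '
-- 	return result
-- ===== SOURCE B (Python) =====
-- def get_tool_tip(description):
--     words = description.split()
--     chunks = []
--     while words:
--         chunks.append(words[:10])
--         words = words[10:]
--     return 'Description:\n\n' + '\n'.join(' '.join(c) + ' ' for c in chunks)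
-- ===== Notes on version B (the rewrite author's own statement) =====
-- stated objective: alternative
-- what changed: Replaces the index-counting loop with its modulo test by slicing the word list into 10-word chunks and joining the chunk strings with newlines.
import Mathlib
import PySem

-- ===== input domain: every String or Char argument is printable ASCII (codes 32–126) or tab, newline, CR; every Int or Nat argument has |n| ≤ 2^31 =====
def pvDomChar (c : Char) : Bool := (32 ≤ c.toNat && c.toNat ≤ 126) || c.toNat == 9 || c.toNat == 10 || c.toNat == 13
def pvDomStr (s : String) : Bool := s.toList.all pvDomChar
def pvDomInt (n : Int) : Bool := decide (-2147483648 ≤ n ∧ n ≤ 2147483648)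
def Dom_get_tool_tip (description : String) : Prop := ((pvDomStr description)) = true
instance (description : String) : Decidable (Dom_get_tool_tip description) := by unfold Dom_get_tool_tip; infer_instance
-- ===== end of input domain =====

-- B replaces A's index loop (newline when i % 10 == 0) by slicing the word list into
-- 10-word chunks and joining the chunk strings with '\n' (alternative decomposition).

-- ===== PORT A =====
def get_tool_tip (description : String) : String :=
  let split_str := PySem.Chars.split₀ description.toList
  String.mk ((PySem.List.pyRange 0 (split_str.length) 1).foldl
    (fun result i =>
      (if PySem.Int.mod i 10 == 0 && !(i == 0) then result ++ ['\n'] else result)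
        ++ PySem.List.pyGetD split_str i [] ++ [' '])
    "Description:\n\n".toList)

-- ===== PORT B =====
-- the 'while words: chunks.append(words[:10]); words = words[10:]' loop of Source B
def pvChunks10 (ws : List (List Char)) : List (List (List Char)) :=
  if h : ws = [] then []
  else ws.take 10 :: pvChunks10 (ws.drop 10)
termination_by ws.length
decreasing_by
  simp only [List.length_drop]
  have : 0 < ws.length := List.length_pos_of_ne_nil h
  omega

def get_tool_tip_alt (description : String) : String :=
  let words := PySem.Chars.split₀ description.toList
  String.mk ("Description:\n\n".toList ++
    PySem.Chars.join ['\n']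
      ((pvChunks10 words).map (fun c => PySem.Chars.join [' '] c ++ [' '])))

-- ===== PRECONDITION & SPEC =====
def Spec_get_tool_tip (description : String) (out : String) : Prop := out = get_tool_tip_alt description
instance (description : String) (out : String) : Decidable (Spec_get_tool_tip description out) := by unfold Spec_get_tool_tip; infer_instance

-- ===== CLAIM (what is proved, stated in full; the proofs are below) =====
def Claim_equal_get_tool_tip : Prop := ∀ (description : String), Dom_get_tool_tip description → Spec_get_tool_tip description (get_tool_tip description)

-- ===== LEMMAS AND PROOFS =====

-- the body of A's loop, as a function of the (index, word) pair
def pvF (acc : List Char) (p : Int × List Char) : List Char :=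
  (if PySem.Int.mod p.1 10 == 0 && !(p.1 == 0) then acc ++ ['\n'] else acc) ++ p.2 ++ [' ']

theorem pvEnum_cons {α : Type} (x : α) (t : List α) (s : Int) :
    PySem.List.enumerate (x :: t) s = (s, x) :: PySem.List.enumerate t (s + 1) := rfl

-- a segment none of whose indices triggers the newline just appends 'word ++ space'
theorem pvL1 (c : List (List Char)) : ∀ (s : Int) (acc : List Char),
    (∀ p ∈ PySem.List.enumerate c s, ¬(PySem.Int.mod p.1 10 = 0 ∧ p.1 ≠ 0)) →
    (PySem.List.enumerate c s).foldl pvF acc = acc ++ c.flatMap (fun w => w ++ [' ']) := by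
  induction c with
  | nil => intro s acc _; simp [PySem.List.enumerate]
  | cons w t ih =>
    intro s acc h
    rw [pvEnum_cons]
    have hhead := h (s, w) (by simp)
    have hcond : (PySem.Int.mod s 10 == 0 && !(s == 0)) = false := by
      by_cases h1 : PySem.Int.mod s 10 = 0 <;> by_cases h2 : s = 0 <;> simp_all
    simp only [List.foldl_cons, pvF, hcond, if_neg]
    rw [ih (s + 1) _ (fun p hp => h p (by simp [pvEnum_cons, hp]))]
    simp

-- every index of enumerate c s lies in [s, s + len c)
theorem pvMemEnum {α : Type} (c : List α) (s : Int) (p : Int × α)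
    (hp : p ∈ PySem.List.enumerate c s) : s ≤ p.1 ∧ p.1 < s + c.length := by
  have : p.1 ∈ (PySem.List.enumerate c s).map (fun x => x.1) := List.mem_map_of_mem hp
  rw [PySem.List.map_fst_enumerate] at this
  exact (PySem.List.mem_pyRange_one).1 this

-- flatMap with trailing spaces IS join-by-space plus one final space (nonempty list)
theorem pvL2 (c : List (List Char)) (hc : c ≠ []) :
    c.flatMap (fun w => w ++ [' ']) = PySem.Chars.join [' '] c ++ [' '] := by
  induction c with
  | nil => simp at hc
  | cons w t ih =>
    cases t with
    | nil => simp [PySem.Chars.join, List.intercalate]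
    | cons y l =>
      rw [PySem.Chars.join_cons_cons]
      simp only [List.flatMap_cons] at ih ⊢
      rw [ih (by simp)]
      simp

-- one full chunk starting at index 10*k (k ≥ 1): newline, then the chunk string
theorem pvL4 (c : List (List Char)) (k : Int) (acc : List Char)
    (hk : 1 ≤ k) (hc : c ≠ []) (hlen : c.length ≤ 10) :
    (PySem.List.enumerate c (10 * k)).foldl pvF acc
      = acc ++ '\n' :: (PySem.Chars.join [' '] c ++ [' ']) := by
  cases c with
  | nil => simp at hc
  | cons w t =>
    rw [pvEnum_cons]
    have hcond : (PySem.Int.mod (10 * k) 10 == 0 && !((10 * k : Int) == 0)) = true := by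
      rw [PySem.Int.mod_eq_emod_of_pos (by norm_num)]
      have h0 : (10 * k : Int) ≠ 0 := by omega
      simp [h0]
    simp only [List.foldl_cons, pvF, hcond, if_pos]
    rw [pvL1 t (10 * k + 1) _ ?_]
    · rw [← pvL2 (w :: t) (by simp)]
      simp [List.flatMap_cons]
    · intro p hp
      have hb := pvMemEnum t (10 * k + 1) p hp
      have ht : (t.length : Int) ≤ 9 := by
        have := hlen; simp at this; omega
      rintro ⟨h1, _⟩
      rw [PySem.Int.mod_eq_emod_of_pos (by norm_num)] at h1
      omega

-- all chunks after the first: each preceded by '\n'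
theorem pvL3 (n : Nat) : ∀ (ws : List (List Char)), ws.length ≤ n → ∀ (k : Int) (acc : List Char), 1 ≤ k →
    (PySem.List.enumerate ws (10 * k)).foldl pvF acc
      = acc ++ (pvChunks10 ws).flatMap (fun c => '\n' :: (PySem.Chars.join [' '] c ++ [' '])) := by
  induction n with
  | zero =>
    intro ws hws k acc _
    have : ws = [] := by cases ws <;> simp_all
    subst this
    simp [PySem.List.enumerate, pvChunks10]
  | succ n ih =>
    intro ws hws k acc hk
    by_cases hnil : ws = []
    · subst hnil; simp [PySem.List.enumerate, pvChunks10]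
    · rw [pvChunks10, dif_neg hnil]
      by_cases hsmall : ws.length ≤ 10
      · have hdrop : ws.drop 10 = [] := by
          apply List.drop_eq_nil_of_le; omega
        have htake : ws.take 10 = ws := List.take_of_length_le hsmall
        rw [hdrop, htake]
        rw [show pvChunks10 ([] : List (List Char)) = [] from by rw [pvChunks10]; simp]
        simp only [List.flatMap_cons, List.flatMap_nil, List.append_nil]
        exact pvL4 ws k acc hk hnil hsmall
      · have hsplit : ws = ws.take 10 ++ ws.drop 10 := (List.take_append_drop 10 ws).symm
        have htlen : (ws.take 10).length = 10 := by simp; omega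
        conv_lhs => rw [hsplit]
        rw [PySem.List.enumerate_append, List.foldl_append]
        rw [pvL4 (ws.take 10) k acc hk (by intro h; simp [h] at htlen) (by omega)]
        have hstart : (10 * k + ((ws.take 10).length : Int)) = 10 * (k + 1) := by
          rw [htlen]; omega
        rw [hstart, ih (ws.drop 10) (by simp; omega) (k + 1) _ (by omega)]
        simp

-- the first chunk (indices 0..9): no newline fires
theorem pvL5 (c : List (List Char)) (acc : List Char) (hlen : c.length ≤ 10) :
    (PySem.List.enumerate c 0).foldl pvF acc = acc ++ c.flatMap (fun w => w ++ [' ']) := by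
  apply pvL1
  intro p hp
  have hb := pvMemEnum c 0 p hp
  rintro ⟨h1, h2⟩
  rw [PySem.Int.mod_eq_emod_of_pos (by norm_num)] at h1
  have hc : (c.length : Int) ≤ 10 := by exact_mod_cast hlen
  omega

-- join-by-newline of a nonempty list = head ++ flatMap of '\n'-prefixed tail
theorem pvL6 (x : List Char) (l : List (List Char)) :
    PySem.Chars.join ['\n'] (x :: l) = x ++ l.flatMap (fun y => '\n' :: y) := by
  induction l generalizing x with
  | nil => simp [PySem.Chars.join, List.intercalate]
  | cons y l ih =>
    rw [PySem.Chars.join_cons_cons, ih y]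
    simp

-- the main list-level equality
theorem pvMain (ws : List (List Char)) (acc : List Char) :
    (PySem.List.enumerate ws 0).foldl pvF acc
      = acc ++ PySem.Chars.join ['\n']
          ((pvChunks10 ws).map (fun c => PySem.Chars.join [' '] c ++ [' '])) := by
  by_cases hnil : ws = []
  · subst hnil
    simp [PySem.List.enumerate, pvChunks10, PySem.Chars.join, List.intercalate]
  · rw [pvChunks10, dif_neg hnil, List.map_cons, pvL6]
    have hsplit : ws = ws.take 10 ++ ws.drop 10 := (List.take_append_drop 10 ws).symm
    conv_lhs => rw [hsplit]
    rw [PySem.List.enumerate_append, List.foldl_append]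
    have htnil : ws.take 10 ≠ [] := by
      intro h
      cases ws with
      | nil => exact hnil rfl
      | cons a t => simp at h
    rw [pvL5 (ws.take 10) acc (by simp)]
    rw [pvL2 (ws.take 10) htnil]
    by_cases hsmall : ws.length ≤ 10
    · have hdrop : ws.drop 10 = [] := by apply List.drop_eq_nil_of_le; omega
      rw [hdrop]
      simp [PySem.List.enumerate, pvChunks10]
    · have htlen : (ws.take 10).length = 10 := by simp; omega
      have hstart : ((0 : Int) + ((ws.take 10).length : Int)) = 10 * 1 := by
        rw [htlen]; omega
      rw [hstart]
      rw [pvL3 ws.length (ws.drop 10) (by simp) 1 _ (by omega)]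
      have : (pvChunks10 (ws.drop 10)).flatMap (fun c => '\n' :: (PySem.Chars.join [' '] c ++ [' ']))
           = ((pvChunks10 (ws.drop 10)).map (fun c => PySem.Chars.join [' '] c ++ [' '])).flatMap (fun y => '\n' :: y) := by
        rw [List.flatMap_map]
      rw [this]
      simp

-- ===== VERDICT (by name: the statement is the Claim_ definition above) =====
theorem get_tool_tip_spec : Claim_equal_get_tool_tip := by
  intro description _
  unfold Spec_get_tool_tip get_tool_tip get_tool_tip_alt
  set ws := PySem.Chars.split₀ description.toList with hws
  have hfold : (PySem.List.pyRange 0 (ws.length) 1).foldl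
      (fun result i =>
        (if PySem.Int.mod i 10 == 0 && !(i == 0) then result ++ ['\n'] else result)
          ++ PySem.List.pyGetD ws i [] ++ [' '])
      "Description:\n\n".toList
      = (PySem.List.enumerate ws 0).foldl pvF "Description:\n\n".toList := by
    rw [PySem.List.enumerate_eq_map_pyRange ws ([] : List Char), List.foldl_map]
    rfl
  simp only [hfold, pvMain]
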